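-- pv_equiv track=rewrite | github.com/palharesf/fcc_daily_challenges | python/2025/11/20251124.py | is_valid_message
-- ===== SOURCE A (Python) =====
-- def is_valid_message(message, validation):
--
--     message = message.lower().split()
--     validation = validation.lower()
--
--     if len(message) != len(validation):
--         return False
--
--     for i in range(len(message)):
--         if message[i][0] != validation[i]:
--             return False
--
--     return True
-- ===== SOURCE B (Python) =====
-- def is_valid_message(message, validation):
--     # Single streaming pass: walk the characters of the message, detect word
--     # starts with an in_word flag, and consume the validation string one
--     # character per word start; never builds the word list.
--     remaining = validation.lower()
--     in_word = False
--     for ch in message.lower():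
--         if ch.isspace():
--             in_word = False
--         elif not in_word:
--             if not remaining or ch != remaining[0]:
--                 return False
--             remaining = remaining[1:]
--             in_word = True
--     return not remaining
-- ===== Notes on version B (the rewrite author's own statement) =====
-- stated objective: alternative
-- what changed: Replaces A's split-into-words-then-indexed-compare with a single streaming pass over the raw characters: an in_word flag detects word starts and each word start consumes one character of the validation string, so no word list is ever materialised and mismatches exit early.
import Mathlib
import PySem

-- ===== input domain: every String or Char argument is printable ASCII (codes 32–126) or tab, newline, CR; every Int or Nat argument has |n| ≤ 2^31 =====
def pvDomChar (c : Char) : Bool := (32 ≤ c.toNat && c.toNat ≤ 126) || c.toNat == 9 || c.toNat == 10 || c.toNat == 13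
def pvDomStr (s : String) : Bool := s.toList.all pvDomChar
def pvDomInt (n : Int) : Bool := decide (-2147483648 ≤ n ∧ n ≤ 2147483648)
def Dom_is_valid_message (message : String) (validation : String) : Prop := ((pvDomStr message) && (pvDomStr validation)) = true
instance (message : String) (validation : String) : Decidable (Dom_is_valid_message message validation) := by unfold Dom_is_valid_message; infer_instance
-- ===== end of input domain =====

-- B replaces A's split-into-words + indexed compare by ONE streaming pass over the characters
-- with an in_word flag, consuming the validation string at each word start (alternative; same cost).

-- ===== PORT A =====
-- the 'for i in range(len(message)): if message[i][0] != validation[i]: return False' loop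
def pvLoopA (ms : List (List Char)) (v : List Char) (i : Nat) : Bool :=
  if i < ms.length then
    if PySem.List.pyGetD (PySem.List.pyGetD ms (i : Int) []) 0 ' ' ≠ PySem.List.pyGetD v (i : Int) ' ' then
      false
    else
      pvLoopA ms v (i + 1)
  else
    true
termination_by ms.length - i

def is_valid_message (message : String) (validation : String) : Bool :=
  let ms := PySem.Chars.split₀ (PySem.Chars.lower message.toList)
  let vl := PySem.Chars.lower validation.toList
  if ms.length ≠ vl.length then false
  else pvLoopA ms vl 0

-- ===== PORT B =====
-- the 'for ch in message.lower(): …' state machine of Source B: state = (remaining, in_word)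
def pvScanB (cs : List Char) (rem : List Char) (inWord : Bool) : Bool :=
  match cs with
  | [] => rem.isEmpty
  | c :: rest =>
    if PySem.Chars.isspace c then pvScanB rest rem false
    else if inWord = false then
      match rem with
      | [] => false
      | r :: rs => if c ≠ r then false else pvScanB rest rs true
    else pvScanB rest rem inWord

def is_valid_message_alt (message : String) (validation : String) : Bool :=
  pvScanB (PySem.Chars.lower message.toList) (PySem.Chars.lower validation.toList) false

-- ===== PRECONDITION & SPEC =====
def Spec_is_valid_message (message : String) (validation : String) (out : Bool) : Prop := out = is_valid_message_alt message validation
instance (message : String) (validation : String) (out : Bool) : Decidable (Spec_is_valid_message message validation out) := by unfold Spec_is_valid_message; infer_instance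

-- ===== CLAIM =====
def Claim_equal_is_valid_message : Prop := ∀ (message : String) (validation : String), Dom_is_valid_message message validation → Spec_is_valid_message message validation (is_valid_message message validation)

-- ===== LEMMAS AND PROOFS =====

-- clean recursive characterisation of str.split()
def pvWords : List Char → List (List Char)
  | [] => []
  | c :: rest =>
    if PySem.Chars.isspace c then pvWords rest
    else (c :: rest.takeWhile (fun d => !PySem.Chars.isspace d)) ::
      pvWords (rest.dropWhile (fun d => !PySem.Chars.isspace d))
termination_by cs => cs.length
decreasing_by
  · simp
  · have := List.length_dropWhile_le (fun d => !PySem.Chars.isspace d) rest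
    simp; omega

lemma pvSplitGo_eq : ∀ (cs cur : List Char) (acc : List (List Char)),
    PySem.Chars.split₀.go cs cur acc =
      acc.reverse ++
        (if cur.isEmpty then pvWords cs
         else (cur.reverse ++ cs.takeWhile (fun d => !PySem.Chars.isspace d)) ::
           pvWords (cs.dropWhile (fun d => !PySem.Chars.isspace d))) := by
  intro cs
  induction cs with
  | nil =>
      intro cur acc
      cases cur with
      | nil => simp [PySem.Chars.split₀.go, pvWords]
      | cons c cur => simp [PySem.Chars.split₀.go, pvWords]
  | cons c rest ih =>
      intro cur acc
      by_cases hs : PySem.Chars.isspace c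
      · cases cur with
        | nil =>
            simp [PySem.Chars.split₀.go, hs, ih [] acc, pvWords]
        | cons d cur =>
            simp [PySem.Chars.split₀.go, hs, pvWords]
            rw [ih]
            simp
      · cases cur with
        | nil =>
            simp [PySem.Chars.split₀.go, hs, ih (c :: []) acc, pvWords]
        | cons d cur =>
            simp [PySem.Chars.split₀.go, hs, ih (c :: d :: cur) acc]

lemma pvSplit_eq_words (cs : List Char) : PySem.Chars.split₀ cs = pvWords cs := by
  have := pvSplitGo_eq cs [] []
  simpa [PySem.Chars.split₀] using this

-- first letters of the words
def pvFirsts (cs : List Char) : List Char :=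
  (pvWords cs).map (fun w => PySem.List.pyGetD w 0 ' ')

lemma pvFirsts_space {c : Char} (rest : List Char) (hs : PySem.Chars.isspace c = true) :
    pvFirsts (c :: rest) = pvFirsts rest := by
  simp [pvFirsts, pvWords, hs]

lemma pvFirsts_nonspace {c : Char} (rest : List Char) (hs : PySem.Chars.isspace c = false) :
    pvFirsts (c :: rest) = c :: pvFirsts (rest.dropWhile (fun d => !PySem.Chars.isspace d)) := by
  simp [pvFirsts, pvWords, hs, PySem.List.pyGetD]

-- the scan computes: first letters of remaining words == remaining validation
lemma pvScanB_spec : ∀ (cs rem : List Char),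
    (pvScanB cs rem false = (pvFirsts cs == rem)) ∧
    (pvScanB cs rem true = (pvFirsts (cs.dropWhile (fun d => !PySem.Chars.isspace d)) == rem)) := by
  intro cs
  induction cs with
  | nil =>
      intro rem
      cases rem <;> simp [pvScanB, pvFirsts, pvWords]
  | cons c rest ih =>
      intro rem
      by_cases hs : PySem.Chars.isspace c
      · constructor
        · simp [pvScanB, hs, (ih rem).1, pvFirsts_space rest hs]
        · simp [pvScanB, hs, (ih rem).1, pvFirsts_space rest hs]
      · constructor
        · rw [pvFirsts_nonspace rest (by simpa using hs)]
          cases rem with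
          | nil => simp [pvScanB, hs]
          | cons r rs =>
              by_cases he : c = r
              · subst he
                simp [pvScanB, hs, (ih rs).2]
              · simp [pvScanB, hs, he]
        · simp [pvScanB, hs, (ih rem).2]

lemma pvLoopA_eq (ms : List (List Char)) (v : List Char) (h : v.length = ms.length) :
    ∀ k i, ms.length - i ≤ k →
      pvLoopA ms v i =
        ((ms.drop i).map (fun w => PySem.List.pyGetD w 0 ' ') == v.drop i) := by
  intro k
  induction k with
  | zero =>
      intro i hle
      have hi : ms.length ≤ i := by omega
      rw [pvLoopA]
      simp [Nat.not_lt.mpr hi, List.drop_eq_nil_of_le hi, List.drop_eq_nil_of_le (h ▸ hi)]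
  | succ k ih =>
      intro i hle
      by_cases hi : i < ms.length
      · have hiv : i < v.length := by omega
        rw [pvLoopA]
        rw [List.drop_eq_getElem_cons hi, List.drop_eq_getElem_cons hiv]
        simp only [hi, if_true, List.map_cons, List.cons_beq_cons,
          PySem.List.pyGetD_natCast, List.getD_eq_getElem?_getD,
          List.getElem?_eq_getElem hi, List.getElem?_eq_getElem hiv, Option.getD_some]
        by_cases he : PySem.List.pyGetD ms[i] 0 ' ' = v[i]
        · simp [he, ih (i + 1) (by omega)]
        · simp [he]
      · have hi' : ms.length ≤ i := by omega
        rw [pvLoopA]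
        simp [Nat.not_lt.mpr hi', List.drop_eq_nil_of_le hi',
          List.drop_eq_nil_of_le (h ▸ hi')]

-- ===== VERDICT =====
theorem is_valid_message_spec : Claim_equal_is_valid_message := by
  intro message validation _
  unfold Spec_is_valid_message is_valid_message is_valid_message_alt
  set cs := PySem.Chars.lower message.toList with hcs
  set vl := PySem.Chars.lower validation.toList with hvl
  rw [(pvScanB_spec cs vl).1]
  rw [pvSplit_eq_words cs]
  by_cases hlen : (pvWords cs).length = vl.length
  · simp only [hlen, ne_eq, not_true_eq_false, if_false]
    have := pvLoopA_eq (pvWords cs) vl hlen.symm (pvWords cs).length 0 (by omega)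
    simpa [pvFirsts] using this
  · simp only [ne_eq, hlen, not_false_eq_true, if_true]
    symm
    rw [beq_eq_false_iff_ne]
    intro heq
    apply hlen
    have := congrArg List.length heq
    simpa [pvFirsts] using this
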